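-- pv_equiv track=rewrite | github.com/prrraveen/Elements_of_programming_interview | epi_judge_python/sunset_view.py | examine_buildings_with_sunset
-- ===== SOURCE A (Python) =====
-- import collections
-- from typing import Iterator, List
--
-- def examine_buildings_with_sunset(sequence: Iterator[int]) -> List[int]:
--     HeightandIdx = collections.namedtuple('HeightandIdx', ('idx', 'height'))
--     stack = []
--     for i, building_height in enumerate(sequence):
--         while stack and stack[-1].height <= building_height:
--             stack.pop()
--         stack.append(HeightandIdx(i, building_height))
--
--     result = [building.idx for building in reversed(stack)]
--     return result
-- ===== SOURCE B (Python) =====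
-- def examine_buildings_with_sunset(sequence):
--     result = []
--     running_max = None
--     for i, h in reversed(list(enumerate(sequence))):
--         if running_max is None or h > running_max:
--             result.append(i)
--             running_max = h
--     return result
-- ===== Notes on version B (the rewrite author's own statement) =====
-- stated objective: simpler
-- what changed: Replaces the monotonic stack of (index,height) namedtuples with pop-loops by a single right-to-left scan keeping one scalar running maximum and appending surviving indices directly.
import Mathlib
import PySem

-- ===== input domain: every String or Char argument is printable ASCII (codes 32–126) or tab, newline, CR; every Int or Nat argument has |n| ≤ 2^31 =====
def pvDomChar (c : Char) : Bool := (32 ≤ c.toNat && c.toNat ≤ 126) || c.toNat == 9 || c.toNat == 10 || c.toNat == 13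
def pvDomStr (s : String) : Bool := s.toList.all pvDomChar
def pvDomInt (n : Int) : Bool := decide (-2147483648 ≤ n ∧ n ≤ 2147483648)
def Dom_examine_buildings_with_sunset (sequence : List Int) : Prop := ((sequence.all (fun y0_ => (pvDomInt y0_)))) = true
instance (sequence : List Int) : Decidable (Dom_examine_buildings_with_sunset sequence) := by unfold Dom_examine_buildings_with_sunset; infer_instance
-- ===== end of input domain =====

-- B replaces A's monotonic stack with a right-to-left scan keeping one scalar running maximum (objective: simpler).


-- ===== PORT A =====
-- 'while stack and stack[-1].height <= building_height: stack.pop()'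
-- stack elements are (idx, height) pairs; list end = stack top, exactly as in Python
def pvPopA (b : Int) (st : List (Int × Int)) : List (Int × Int) :=
  if hst : st = [] then st
  else if (st.getLast hst).2 ≤ b then pvPopA b st.dropLast else st
termination_by st.length
decreasing_by
  have h0 : st.length ≠ 0 := fun h => hst (List.length_eq_zero_iff.mp h)
  simp [List.length_dropLast]; omega

def examine_buildings_with_sunset (sequence : List Int) : List Int :=
  let stack := (PySem.List.enumerate sequence 0).foldl
    (fun st p => pvPopA p.2 st ++ [p]) []
  stack.reverse.map (·.1)

-- ===== PORT B =====
def examine_buildings_with_sunset_alt (sequence : List Int) : List Int :=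
  let st := (PySem.List.enumerate sequence 0).reverse.foldl
    (fun (s : List Int × Option Int) p =>
      match s.2 with
      | none => (s.1 ++ [p.1], some p.2)
      | some v => if v < p.2 then (s.1 ++ [p.1], some p.2) else s)
    ([], none)
  st.1

-- ===== PRECONDITION & SPEC =====
def Spec_examine_buildings_with_sunset (sequence : List Int) (out : List Int) : Prop := out = examine_buildings_with_sunset_alt sequence
instance (sequence : List Int) (out : List Int) : Decidable (Spec_examine_buildings_with_sunset sequence out) := by unfold Spec_examine_buildings_with_sunset; infer_instance

-- ===== CLAIM (what is proved, stated in full; the proofs are below) =====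
def Claim_equal_examine_buildings_with_sunset : Prop := ∀ (sequence : List Int), Dom_examine_buildings_with_sunset sequence → Spec_examine_buildings_with_sunset sequence (examine_buildings_with_sunset sequence)

-- ===== LEMMAS AND PROOFS =====

-- "beats the running max m": max absent or strictly below h
def pvBeats (m : Option Int) (h : Int) : Bool :=
  match m with | none => true | some v => decide (v < h)

-- survivors of an enumerated list: entries strictly taller than everything after them
def pvSurv : List (Int × Int) → List (Int × Int)
  | [] => []
  | p :: t => if t.all (fun q => decide (q.2 < p.2)) then p :: pvSurv t else pvSurv t

-- B's step function (the foldl body of the alt port), selection list and running-max update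
def pvStep (s : List Int × Option Int) (p : Int × Int) : List Int × Option Int :=
  match s.2 with
  | none => (s.1 ++ [p.1], some p.2)
  | some v => if v < p.2 then (s.1 ++ [p.1], some p.2) else s

def pvSel (m : Option Int) : List (Int × Int) → List Int
  | [] => []
  | p :: t => if pvBeats m p.2 then p.1 :: pvSel (some p.2) t else pvSel m t

def pvMupd (m : Option Int) : List (Int × Int) → Option Int
  | [] => m
  | p :: t => pvMupd (if pvBeats m p.2 then some p.2 else m) t

theorem pvSurv_mem {e : List (Int × Int)} {q : Int × Int} (h : q ∈ pvSurv e) : q ∈ e := by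
  induction e with
  | nil => simp [pvSurv] at h
  | cons p t ih =>
    by_cases hc : t.all (fun q => decide (q.2 < p.2)) <;> simp [pvSurv, hc] at h
    · rcases h with h | h
      · simp [h]
      · exact List.mem_cons_of_mem _ (ih h)
    · exact List.mem_cons_of_mem _ (ih h)

-- pvSurv is strictly decreasing in height along the list
theorem pvSurv_pairwise (e : List (Int × Int)) :
    (pvSurv e).Pairwise (fun p q => q.2 < p.2) := by
  induction e with
  | nil => simp [pvSurv]
  | cons p t ih =>
    by_cases hc : t.all (fun q => decide (q.2 < p.2)) <;> simp [pvSurv, hc]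
    · refine ⟨fun x y hxy => ?_, ih⟩
      have hmem := pvSurv_mem hxy
      simpa using List.all_eq_true.mp hc (x, y) hmem
    · exact ih

-- popping from a strictly decreasing stack = filtering the elements strictly above b
theorem pvPopA_eq_filter (b : Int) (st : List (Int × Int))
    (hp : st.Pairwise (fun p q => q.2 < p.2)) :
    pvPopA b st = st.filter (fun p => decide (b < p.2)) := by
  induction st using List.reverseRecOn with
  | nil => simp [pvPopA]
  | append_singleton l a ih =>
    have hl : l.Pairwise (fun p q => q.2 < p.2) := (List.pairwise_append.mp hp).1
    have hne : l ++ [a] ≠ [] := by simp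
    have hlast : (l ++ [a]).getLast hne = a := by simp
    rw [pvPopA, dif_neg hne]
    by_cases hle : a.2 ≤ b
    · rw [if_pos (by rw [hlast]; exact hle), List.dropLast_concat, ih hl,
        List.filter_append]
      simp [not_lt.mpr hle]
    · rw [if_neg (by rw [hlast]; exact hle)]
      have hall : ∀ p ∈ l ++ [a], decide (b < p.2) = true := by
        intro p hpmem
        rcases List.mem_append.mp hpmem with h | h
        · have := (List.pairwise_append.mp hp).2.2 p h a (by simp)
          simp only [decide_eq_true_eq]; omega
        · simp only [List.mem_singleton] at h; subst h
          simp only [decide_eq_true_eq]; omega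
      rw [List.filter_eq_self.mpr hall]

-- survivors after appending one entry on the right
theorem pvSurv_append_single (e : List (Int × Int)) (a : Int × Int) :
    pvSurv (e ++ [a]) = (pvSurv e).filter (fun p => decide (a.2 < p.2)) ++ [a] := by
  induction e with
  | nil => simp [pvSurv]
  | cons p t ih =>
    by_cases hc : t.all (fun q => decide (q.2 < p.2))
    · by_cases ha : a.2 < p.2
      · have hc' : ((t ++ [a]).all (fun q => decide (q.2 < p.2))) = true := by
          simp at hc ⊢; exact ⟨hc, ha⟩
        simp only [List.cons_append, pvSurv, hc', if_pos, ih]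
        simp [hc, ha]
      · have hc' : ((t ++ [a]).all (fun q => decide (q.2 < p.2))) = false := by
          simp at hc ⊢; intro _; omega
        simp only [List.cons_append, pvSurv, hc', ih]
        simp [hc, ha]
    · have hcf : (t.all (fun q => decide (q.2 < p.2))) = false := by
        simpa using hc
      have hc' : ((t ++ [a]).all (fun q => decide (q.2 < p.2))) = false := by
        rw [List.all_append, hcf, Bool.false_and]
      simp only [List.cons_append, pvSurv, hc', ih]
      simp [hc]

-- A's fold computes pvSurv
theorem pvFoldA_eq_surv (e : List (Int × Int)) :
    e.foldl (fun st p => pvPopA p.2 st ++ [p]) [] = pvSurv e := by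
  induction e using List.reverseRecOn with
  | nil => simp [pvSurv]
  | append_singleton l a ih =>
    rw [List.foldl_append, ih, List.foldl_cons, List.foldl_nil,
      pvPopA_eq_filter a.2 (pvSurv l) (pvSurv_pairwise l), pvSurv_append_single]

-- B's fold in terms of pvSel / pvMupd
theorem pvFoldB_eq (r : List (Int × Int)) : ∀ (acc : List Int) (m : Option Int),
    r.foldl pvStep (acc, m) = (acc ++ pvSel m r, pvMupd m r) := by
  induction r with
  | nil => intro acc m; simp [pvSel, pvMupd]
  | cons p t ih =>
    intro acc m
    rw [List.foldl_cons]
    cases m with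
    | none =>
      simp only [pvStep]
      rw [ih]
      simp [pvSel, pvMupd, pvBeats]
    | some v =>
      by_cases hv : v < p.2
      · simp only [pvStep, if_pos hv]
        rw [ih]
        simp [pvSel, pvMupd, pvBeats, hv]
      · simp only [pvStep, if_neg hv]
        rw [ih]
        simp [pvSel, pvMupd, pvBeats, hv]

theorem pvSel_append (l1 l2 : List (Int × Int)) : ∀ m,
    pvSel m (l1 ++ l2) = pvSel m l1 ++ pvSel (pvMupd m l1) l2 := by
  induction l1 with
  | nil => intro m; simp [pvSel, pvMupd]
  | cons p t ih =>
    intro m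
    by_cases hb : pvBeats m p.2 <;> simp [pvSel, pvMupd, hb, ih]

-- beating the updated max = beating the old max and every height in r
theorem pvBeats_mupd (r : List (Int × Int)) : ∀ (m : Option Int) (h : Int),
    pvBeats (pvMupd m r) h = (pvBeats m h && r.all (fun q => decide (q.2 < h))) := by
  induction r with
  | nil => intro m h; simp [pvMupd]
  | cons p t ih =>
    intro m h
    cases m with
    | none =>
      rw [pvMupd, if_pos (by simp [pvBeats]), ih]
      simp [pvBeats]
    | some v =>
      by_cases hv : v < p.2
      · rw [pvMupd, if_pos (by simp [pvBeats, hv]), ih]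
        by_cases h1 : p.2 < h
        · have h2 : v < h := lt_trans hv h1
          simp [pvBeats, h1, h2]
        · simp [pvBeats, h1]
      · rw [pvMupd, if_neg (by simp [pvBeats, hv]), ih]
        by_cases h2 : v < h
        · have h1 : p.2 < h := lt_of_le_of_lt (not_lt.mp hv) h2
          simp [pvBeats, h1, h2]
        · simp [pvBeats, h2]

-- survivors that moreover beat an initial bound m
def pvSurvM (m : Option Int) : List (Int × Int) → List (Int × Int)
  | [] => []
  | p :: t => if (t.all (fun q => decide (q.2 < p.2)) && pvBeats m p.2) then p :: pvSurvM m t else pvSurvM m t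

theorem pvSurvM_none (e : List (Int × Int)) : pvSurvM none e = pvSurv e := by
  induction e with
  | nil => rfl
  | cons p t ih =>
    rw [pvSurvM, pvSurv, ih, show pvBeats none p.2 = true from rfl, Bool.and_true]

theorem pvSel_reverse (e : List (Int × Int)) : ∀ (m : Option Int),
    pvSel m e.reverse = ((pvSurvM m e).map (·.1)).reverse := by
  induction e with
  | nil => intro m; simp [pvSel, pvSurvM]
  | cons a t ih =>
    intro m
    rw [List.reverse_cons, pvSel_append, ih]
    rw [pvSurvM]
    by_cases hc : (t.all (fun q => decide (q.2 < a.2)) && pvBeats m a.2) = true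
    · simp only [if_pos hc]
      have hb : pvBeats (pvMupd m t.reverse) a.2 = true := by
        rw [pvBeats_mupd, List.all_reverse]
        have h1 : (t.all fun q => decide (q.2 < a.2)) = true ∧ pvBeats m a.2 = true := by
          simpa using hc
        rw [h1.1, h1.2]; rfl
      simp [pvSel, hb]
    · simp only [if_neg hc]
      have hb : pvBeats (pvMupd m t.reverse) a.2 = false := by
        rw [pvBeats_mupd, List.all_reverse]
        cases hta : t.all (fun q => decide (q.2 < a.2)) with
        | true =>
          cases hm : pvBeats m a.2 with
          | true => exact absurd (by rw [hta, hm]; rfl) hc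
          | false => simp
        | false => simp
      simp [pvSel, hb]

-- ===== VERDICT (by name: the statement is the Claim_ definition above) =====
theorem examine_buildings_with_sunset_spec : Claim_equal_examine_buildings_with_sunset := by
  intro sequence _
  unfold Spec_examine_buildings_with_sunset examine_buildings_with_sunset examine_buildings_with_sunset_alt
  have hA := pvFoldA_eq_surv (PySem.List.enumerate sequence 0)
  have hB := pvFoldB_eq (PySem.List.enumerate sequence 0).reverse [] none
  simp only []
  rw [hA, show (fun (s : List Int × Option Int) p =>
      match s.2 with
      | none => (s.1 ++ [p.1], some p.2)
      | some v => if v < p.2 then (s.1 ++ [p.1], some p.2) else s) = pvStep from rfl,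
    hB]
  simp only [List.nil_append]
  rw [pvSel_reverse, pvSurvM_none, List.map_reverse]
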